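-- pv_equiv track=rewrite | github.com/xxbidiao/GenerationMania | scripts/DBtoLearn.py | normalize3
-- ===== SOURCE A (Python) =====
-- def normalize3(v):
--     max_index = -1
--     max_value = -1
--     max2_index = -1
--     max2_value = -1
--     for key in v:
--         value = v[key][0] #playable
--         if value > max_value:
--             max2_index = max_index
--             max2_value = max_value
--             max_value = value
--             max_index = key
--         elif value > max2_value:
--             max2_index = key
--             max2_value = value
--     result = {}
--     for key in v:
--         if max_index == key:
--             result[key] = [1,0]
--         elif max2_index == key:
--             result[key] = [0,1]
--         else:
--             result[key] = [0,0]
--     return result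
-- ===== SOURCE B (Python) =====
-- def normalize3(v):
--     # Rank the entries with a nonnegative playable count, best first (stable sort
--     # keeps dict order on ties), then label the best [1,0], the runner-up [0,1].
--     ranked = sorted((k for k in v if v[k][0] >= 0), key=lambda k: v[k][0], reverse=True)
--     result = {k: [0, 0] for k in v}
--     if ranked:
--         result[ranked[0]] = [1, 0]
--     if len(ranked) > 1:
--         result[ranked[1]] = [0, 1]
--     return result
-- ===== Notes on version B (the rewrite author's own statement) =====
-- stated objective: simpler
-- what changed: The two hand-rolled running top-two tracking passes are replaced by one stable descending sort of the keys with a nonnegative playable count, whose first two positions are marked on top of an all-[0,0] dict.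
-- intended difference: On dicts that contain the key -1 while fewer than two entries have a nonnegative playable count (and -1 is not itself the single selected key), A's -1 sentinel collides with the literal key -1 and A spuriously marks key -1 as [1,0] or [0,1]; B leaves it [0,0], which is the intended value since that entry was never selected. — e.g. on normalize3([(5, [2]), (-1, [-3])]): A returns [(5, [1, 0]), (-1, [0, 1])], B returns [(5, [1, 0]), (-1, [0, 0])]
import Mathlib
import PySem

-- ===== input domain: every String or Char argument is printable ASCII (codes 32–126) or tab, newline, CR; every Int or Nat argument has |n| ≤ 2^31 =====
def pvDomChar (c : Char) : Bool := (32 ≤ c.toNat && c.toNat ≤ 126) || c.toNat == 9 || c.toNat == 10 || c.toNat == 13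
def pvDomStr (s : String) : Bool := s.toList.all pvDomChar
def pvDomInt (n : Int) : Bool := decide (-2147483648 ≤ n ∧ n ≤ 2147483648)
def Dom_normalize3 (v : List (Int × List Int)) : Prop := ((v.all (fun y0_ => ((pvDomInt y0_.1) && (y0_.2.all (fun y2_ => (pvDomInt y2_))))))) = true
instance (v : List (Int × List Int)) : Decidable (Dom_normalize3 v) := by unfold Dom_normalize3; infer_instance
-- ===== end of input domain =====

-- B replaces A's two manual running top-two tracking passes by a stable descending sort
-- of the keys with nonnegative playable count plus a marking pass (objective: simpler).
-- Intended difference (D_): A's -1 sentinel can collide with a literal key -1 and mark it;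
-- B leaves such a never-selected key [0,0].


-- ===== PORT A =====
-- shared transliteration of the expression `v[key][0]` (dict lookup, then item 0);
-- the `.getD` defaults are never reached under Pre_normalize3
def pvVal (v : List (Int × List Int)) (k : Int) : Int :=
  (PySem.List.pyGet? ((PySem.Dict.get? (PySem.Dict.ofList v) k).getD []) 0).getD 0

def normalize3 (v : List (Int × List Int)) : List (Int × List Int) :=
  -- state = (max_index, max_value, max2_index, max2_value)
  let s := (PySem.Dict.ofList v).keys.foldl (fun (s : Int × Int × Int × Int) key =>
      let value := pvVal v key
      if value > s.2.1 then (key, value, s.1, s.2.1)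
      else if value > s.2.2.2 then (s.1, s.2.1, key, value)
      else s) (-1, -1, -1, -1)
  let result := (PySem.Dict.ofList v).keys.foldl (fun (r : PySem.Dict Int (List Int)) key =>
      if s.1 == key then r.insert key [1, 0]
      else if s.2.2.1 == key then r.insert key [0, 1]
      else r.insert key [0, 0]) PySem.Dict.empty
  result.items

-- ===== PORT B =====
def normalize3_alt (v : List (Int × List Int)) : List (Int × List Int) :=
  let ranked := PySem.List.sorted
    (((PySem.Dict.ofList v).keys).filter (fun k => decide (0 ≤ pvVal v k)))
    (fun k => pvVal v k) true
  let result := (PySem.Dict.ofList v).keys.foldl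
    (fun (r : PySem.Dict Int (List Int)) k => r.insert k [0, 0]) PySem.Dict.empty
  let result := match ranked with
    | k :: _ => result.insert k [1, 0]
    | [] => result
  let result := match ranked with
    | _ :: k :: _ => result.insert k [0, 1]
    | _ => result
  result.items

-- ===== PRECONDITION & SPEC =====
-- Pre_ excludes inputs whose dict carries an empty value list, on which Python A raises IndexError at v[key][0].
def Pre_normalize3 (v : List (Int × List Int)) : Prop := ∀ p ∈ (PySem.Dict.ofList v).items, p.2 ≠ []
instance (v : List (Int × List Int)) : Decidable (Pre_normalize3 v) := by unfold Pre_normalize3; infer_instance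

def pvWitness_normalize3 : (List (Int × List Int)) := [(3, [5, 2]), (-1, [0]), (7, [5])]

-- On dicts containing key -1 while fewer than two entries have a nonnegative playable count
-- (and -1 is not itself the single selected key), A's -1 sentinel collides with the literal
-- key -1 and A spuriously marks key -1 as [1,0]/[0,1]; B leaves it [0,0], the intended value.
def D_normalize3 (v : List (Int × List Int)) : Prop :=
  let ks := (PySem.Dict.ofList v).keys
  let cands := ks.filter (fun k => decide (0 ≤ pvVal v k))
  (-1 : Int) ∈ ks ∧ cands.length ≤ 1 ∧ cands ≠ [-1]
instance (v : List (Int × List Int)) : Decidable (D_normalize3 v) := by unfold D_normalize3; infer_instance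

def Spec_normalize3 (v : List (Int × List Int)) (out : List (Int × List Int)) : Prop :=
  ¬ D_normalize3 v → out = normalize3_alt v
instance (v : List (Int × List Int)) (out : List (Int × List Int)) : Decidable (Spec_normalize3 v out) := by unfold Spec_normalize3; infer_instance

def pvDiffWitness_normalize3 : (List (Int × List Int)) := [(5, [2]), (-1, [-3])]
def pvDiffWitnessOut_normalize3 : (List (Int × List Int)) × (List (Int × List Int)) :=
  ([(5, [1, 0]), (-1, [0, 1])], [(5, [1, 0]), (-1, [0, 0])])

-- ===== CLAIM (what is proved, stated in full; the proofs are below) =====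
def Claim_unchanged_normalize3 : Prop := ∀ (v : List (Int × List Int)), Dom_normalize3 v → Pre_normalize3 v → Spec_normalize3 v (normalize3 v)
def Claim_changed_normalize3 : Prop := Dom_normalize3 (pvDiffWitness_normalize3) ∧ Pre_normalize3 (pvDiffWitness_normalize3) ∧ D_normalize3 (pvDiffWitness_normalize3) ∧ normalize3 (pvDiffWitness_normalize3) = pvDiffWitnessOut_normalize3.1 ∧ normalize3_alt (pvDiffWitness_normalize3) = pvDiffWitnessOut_normalize3.2 ∧ pvDiffWitnessOut_normalize3.1 ≠ pvDiffWitnessOut_normalize3.2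
def Claim_exact_normalize3 : Prop := ∀ (v : List (Int × List Int)), Dom_normalize3 v → Pre_normalize3 v → D_normalize3 v → normalize3 v ≠ normalize3_alt v

-- ===== LEMMAS AND PROOFS =====

-- A's loop step, abstracted over the value function f
def pvStep (f : Int → Int) (s : Int × Int × Int × Int) (key : Int) : Int × Int × Int × Int :=
  let value := f key
  if value > s.2.1 then (key, value, s.1, s.2.1)
  else if value > s.2.2.2 then (s.1, s.2.1, key, value)
  else s

-- the state A's loop maintains, read off the stable descending sort of the processed keys
def pvSel (f : Int → Int) : Option Int → Int
  | some k => if f k > -1 then k else -1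
  | none => -1

def pvMVal (f : Int → Int) : Option Int → Int
  | some k => if f k > -1 then f k else -1
  | none => -1

def pvInv (f : Int → Int) (os : List Int) : Int × Int × Int × Int :=
  (pvSel f os[0]?, pvMVal f os[0]?, pvSel f os[1]?, pvMVal f os[1]?)

theorem pvStep_insertBy (f : Int → Int) (os : List Int) (x : Int)
    (h : os.Pairwise (fun a b => f b ≤ f a)) :
    pvStep f (pvInv f os) x = pvInv f (PySem.List.insertBy (fun a b => decide (f b < f a)) x os) := by
  rcases os with _ | ⟨a, _ | ⟨b, t⟩⟩
  · simp [pvStep, pvInv, pvSel, pvMVal, PySem.List.insertBy]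
    split_ifs <;> first | rfl | omega
  · simp only [pvStep, pvInv, pvSel, pvMVal, PySem.List.insertBy]
    split_ifs <;> simp_all <;> (try (split_ifs <;> simp_all)) <;> try omega
  · have hba : f b ≤ f a := (List.pairwise_cons.mp h).1 b (by simp)
    simp only [pvStep, pvInv, pvSel, pvMVal, PySem.List.insertBy]
    split_ifs <;> simp_all <;> (try (split_ifs <;> simp_all)) <;> try omega

theorem pvTop2 (f : Int → Int) (ks : List Int) :
    ks.foldl (pvStep f) (-1, -1, -1, -1) = pvInv f (PySem.List.sorted ks f true) := by
  rw [PySem.List.sorted_rev_eq_foldl_insertBy]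
  induction ks using List.reverseRecOn with
  | nil => simp [pvInv, pvSel, pvMVal]
  | append_singleton ks x ih =>
    rw [List.foldl_append, List.foldl_append, ih]
    simp only [List.foldl_cons, List.foldl_nil]
    apply pvStep_insertBy
    rw [← PySem.List.sorted_rev_eq_foldl_insertBy]
    exact PySem.List.sorted_pairwise_rev ks f

-- inserting an element larger than everything in the list puts it in front
theorem pvInsertBy_all_lt (f : Int → Int) (x : Int) (l : List Int)
    (h : ∀ z ∈ l, f z < f x) :
    PySem.List.insertBy (fun a b => decide (f b < f a)) x l = x :: l := by
  cases l with
  | nil => rfl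
  | cons y t => simp [PySem.List.insertBy, h y (by simp)]

-- filtering commutes with a descending insertion into a descending-sorted list
theorem pvFilter_insertBy (f : Int → Int) (p : Int → Bool) (x : Int) (os : List Int)
    (h : os.Pairwise (fun a b => f b ≤ f a)) :
    (PySem.List.insertBy (fun a b => decide (f b < f a)) x os).filter p =
      if p x then PySem.List.insertBy (fun a b => decide (f b < f a)) x (os.filter p)
      else os.filter p := by
  induction os with
  | nil => cases hp : p x <;> simp [PySem.List.insertBy, hp]
  | cons y t ih =>
    have hyt : ∀ z ∈ t, f z ≤ f y := (List.pairwise_cons.mp h).1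
    have ht : t.Pairwise (fun a b => f b ≤ f a) := (List.pairwise_cons.mp h).2
    simp only [PySem.List.insertBy]
    by_cases hxy : f y < f x
    · have hall : ∀ z ∈ (y :: t).filter p, f z < f x := by
        intro z hz
        have hz' := List.mem_of_mem_filter hz
        rcases List.mem_cons.mp hz' with rfl | hz''
        · exact hxy
        · exact lt_of_le_of_lt (hyt z hz'') hxy
      cases hp : p x
      · simp [hxy, hp]
      · simp only [hxy, decide_true, if_true, hp]
        rw [pvInsertBy_all_lt f x _ hall]
        simp [hp]
    · simp only [hxy, decide_false, Bool.false_eq_true, if_false]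
      cases hpy : p y
      · simp only [List.filter_cons, hpy, Bool.false_eq_true, if_false, ih ht]
      · simp only [List.filter_cons, hpy, if_true]
        rw [ih ht]
        cases hp : p x
        · simp
        · simp [PySem.List.insertBy, hxy]

-- sorting descending commutes with filtering
theorem pvSorted_filter (f : Int → Int) (p : Int → Bool) (ks : List Int) :
    (PySem.List.sorted ks f true).filter p = PySem.List.sorted (ks.filter p) f true := by
  rw [PySem.List.sorted_rev_eq_foldl_insertBy, PySem.List.sorted_rev_eq_foldl_insertBy,
    ← PySem.List.foldl_if_eq_foldl_filter p
      (fun acc x => PySem.List.insertBy (fun a b => decide (f b < f a)) x acc) ks []]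
  induction ks using List.reverseRecOn with
  | nil => rfl
  | append_singleton ks x ih =>
    rw [List.foldl_append, List.foldl_append]
    simp only [List.foldl_cons, List.foldl_nil]
    have hpw : (List.foldl (fun acc x => PySem.List.insertBy (fun a b => decide (f b < f a)) x acc) [] ks).Pairwise
        (fun a b => f b ≤ f a) := by
      rw [← PySem.List.sorted_rev_eq_foldl_insertBy]
      exact PySem.List.sorted_pairwise_rev ks f
    rw [pvFilter_insertBy f p x _ hpw, ih]

-- the label functions both result dicts assign to each key
def pvLabelA (m1 m2 k : Int) : List Int :=
  if m1 == k then [1, 0] else if m2 == k then [0, 1] else [0, 0]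

def pvLabelB (ranked : List Int) (k : Int) : List Int :=
  match ranked with
  | r0 :: r1 :: _ => if k == r1 then [0, 1] else if k == r0 then [1, 0] else [0, 0]
  | [r0] => if k == r0 then [1, 0] else [0, 0]
  | [] => [0, 0]

-- A's result as a map over the keys
theorem pvItemsA (ks : List Int) (m1 m2 : Int) (hnd : ks.Nodup) :
    (ks.foldl (fun (r : PySem.Dict Int (List Int)) key =>
      if m1 == key then r.insert key [1, 0]
      else if m2 == key then r.insert key [0, 1]
      else r.insert key [0, 0]) PySem.Dict.empty).items
    = ks.map (fun k => (k, pvLabelA m1 m2 k)) := by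
  have hcongr : ks.foldl (fun (r : PySem.Dict Int (List Int)) key =>
      if m1 == key then r.insert key [1, 0]
      else if m2 == key then r.insert key [0, 1]
      else r.insert key [0, 0]) PySem.Dict.empty
      = ks.foldl (fun (r : PySem.Dict Int (List Int)) key => r.insert key (pvLabelA m1 m2 key)) PySem.Dict.empty := by
    apply PySem.List.foldl_congr_mem
    intro r k _
    unfold pvLabelA
    split_ifs <;> rfl
  rw [hcongr]
  have := PySem.Dict.items_foldl_insert_fresh (l := ks) (k := fun x => x)
    (v := fun k => pvLabelA m1 m2 k) (d := PySem.Dict.empty)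
    (by intro a _; simp [PySem.Dict.contains_empty]) (by simpa using hnd)
  simpa [PySem.Dict.items] using this

-- B's base dict as a map over the keys
theorem pvItemsB0 (ks : List Int) (hnd : ks.Nodup) :
    (ks.foldl (fun (r : PySem.Dict Int (List Int)) k => r.insert k [0, 0]) PySem.Dict.empty).items
    = ks.map (fun k => (k, ([0, 0] : List Int))) := by
  have := PySem.Dict.items_foldl_insert_fresh (l := ks) (k := fun x => x)
    (v := fun _ => ([0, 0] : List Int)) (d := PySem.Dict.empty)
    (by intro a _; simp [PySem.Dict.contains_empty]) (by simpa using hnd)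
  simpa [PySem.Dict.items] using this

-- B's result as a map over the keys, for an arbitrary ranked list drawn from the keys
theorem pvItemsB_gen (ks ranked : List Int) (hnd : ks.Nodup) (hrnd : ranked.Nodup) (hsub : ∀ r ∈ ranked, r ∈ ks) :
    (let d0 := ks.foldl (fun (r : PySem.Dict Int (List Int)) k => r.insert k [0, 0]) PySem.Dict.empty
     let d1 := match ranked with
       | k :: _ => d0.insert k [1, 0]
       | [] => d0
     let d2 := match ranked with
       | _ :: k :: _ => d1.insert k [0, 1]
       | _ => d1
     d2.items) = ks.map (fun k => (k, pvLabelB ranked k)) := by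
  have hd0items : (ks.foldl (fun (r : PySem.Dict Int (List Int)) k => r.insert k [0, 0]) PySem.Dict.empty).items
      = ks.map (fun k => (k, ([0, 0] : List Int))) := pvItemsB0 ks hnd
  have hkeys0 : (ks.foldl (fun (r : PySem.Dict Int (List Int)) k => r.insert k [0, 0]) PySem.Dict.empty).keys = ks := by
    simp [PySem.Dict.keys, hd0items, List.map_map, Function.comp_def]
  rcases ranked with _ | ⟨r0, _ | ⟨r1, rt⟩⟩
  · rw [hd0items]
    apply List.map_congr_left
    intro k _
    simp [pvLabelB]
  · have h0 : (ks.foldl (fun (r : PySem.Dict Int (List Int)) k => r.insert k [0, 0]) PySem.Dict.empty).contains r0 = true :=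
      (PySem.Dict.contains_iff_mem_keys _ _).mpr (by rw [hkeys0]; exact hsub r0 (by simp))
    rw [PySem.Dict.items_insert_of_contains _ _ h0]
    rw [hd0items, List.map_map]
    apply List.map_congr_left
    intro k _
    by_cases hk : k = r0 <;> simp [pvLabelB, hk]
  · have h0 : (ks.foldl (fun (r : PySem.Dict Int (List Int)) k => r.insert k [0, 0]) PySem.Dict.empty).contains r0 = true :=
      (PySem.Dict.contains_iff_mem_keys _ _).mpr (by rw [hkeys0]; exact hsub r0 (by simp))
    have hne : r0 ≠ r1 := by
      intro h
      exact (List.nodup_cons.mp hrnd).1 (h ▸ (by simp : r1 ∈ r1 :: rt))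
    have hkeys1 : ((ks.foldl (fun (r : PySem.Dict Int (List Int)) k => r.insert k [0, 0]) PySem.Dict.empty).insert r0 [1, 0]).keys = ks := by
      simp only [PySem.Dict.keys, PySem.Dict.items_insert_of_contains _ _ h0, hd0items, List.map_map]
      have hcg : ∀ k ∈ ks, ((fun (x : Int × List Int) => x.1) ∘ (fun p => if (p.1 == r0) = true then (r0, ([1, 0] : List Int)) else p) ∘ fun k => (k, ([0, 0] : List Int))) k = k := by
        intro k _
        by_cases hk : k = r0 <;> simp [hk]
      rw [List.map_congr_left hcg]
      simp
    have h1 : ((ks.foldl (fun (r : PySem.Dict Int (List Int)) k => r.insert k [0, 0]) PySem.Dict.empty).insert r0 [1, 0]).contains r1 = true :=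
      (PySem.Dict.contains_iff_mem_keys _ _).mpr (by rw [hkeys1]; exact hsub r1 (by simp))
    rw [PySem.Dict.items_insert_of_contains _ _ h1]
    rw [PySem.Dict.items_insert_of_contains _ _ h0]
    rw [hd0items, List.map_map, List.map_map]
    apply List.map_congr_left
    intro k _
    by_cases hk1 : k = r1
    · simp [pvLabelB, hk1, Ne.symm hne]
    · by_cases hk0 : k = r0 <;> simp [pvLabelB, hk0, hk1, hne]

-- head of the descending sort is kept by the filter whenever the filter keeps anything
theorem pvRanked_head (f : Int → Int) (p : Int → Bool) (ss : List Int)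
    (hpw : ss.Pairwise (fun a b => f b ≤ f a))
    (hmono : ∀ a b : Int, f b ≤ f a → p b = true → p a = true) :
    ∀ r0 rt, ss.filter p = r0 :: rt →
      ∃ t, ss = r0 :: t ∧ t.filter p = rt := by
  induction ss with
  | nil => intro r0 rt h; simp at h
  | cons y t ih =>
    intro r0 rt h
    have hyt : ∀ z ∈ t, f z ≤ f y := (List.pairwise_cons.mp hpw).1
    cases hpy : p y
    · -- y filtered out: but y has the max value, so anything kept would force p y
      exfalso
      have hr0 : r0 ∈ (y :: t).filter p := by rw [h]; simp
      have hr0' := List.mem_of_mem_filter hr0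
      have hp0 : p r0 = true := List.of_mem_filter hr0
      rcases List.mem_cons.mp hr0' with rfl | hm
      · rw [hpy] at hp0; exact Bool.false_ne_true hp0
      · have := hmono y r0 (hyt r0 hm) hp0
        rw [hpy] at this; exact Bool.false_ne_true this
    · rw [List.filter_cons_of_pos hpy] at h
      obtain ⟨rfl, rfl⟩ : y = r0 ∧ t.filter p = rt := by
        constructor
        · exact (List.cons.injEq .. ▸ h).1
        · exact (List.cons.injEq .. ▸ h).2
      exact ⟨t, rfl, rfl⟩

-- the main agreement theorem outside D_
theorem pvMain (v : List (Int × List Int)) (hnd : ¬ D_normalize3 v) :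
    normalize3 v = normalize3_alt v := by
  have hndk : (PySem.Dict.ofList v).keys.Nodup := PySem.Dict.nodup_keys_ofList v
  set f := pvVal v with hf
  set ks := (PySem.Dict.ofList v).keys with hks
  set p : Int → Bool := fun k => decide (0 ≤ f k) with hp
  set ss := PySem.List.sorted ks f true with hss
  have hssnd : ss.Nodup := ((PySem.List.sorted_perm ks f true).nodup_iff).mpr hndk
  have hpw : ss.Pairwise (fun a b => f b ≤ f a) := PySem.List.sorted_pairwise_rev ks f
  have hmono : ∀ a b : Int, f b ≤ f a → p b = true → p a = true := by
    intro a b hab hb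
    simp only [hp, decide_eq_true_eq] at hb ⊢
    omega
  have hranked : PySem.List.sorted (ks.filter p) (fun k => f k) true = ss.filter p :=
    (pvSorted_filter f p ks).symm
  have hnd' : ¬ ((-1 : Int) ∈ ks ∧ (ks.filter p).length ≤ 1 ∧ ks.filter p ≠ [-1]) :=
    fun h => hnd h
  -- A's tracking state
  have hA : normalize3 v = ks.map (fun k => (k, pvLabelA (pvSel f ss[0]?) (pvSel f ss[2 - 1]?) k)) := by
    unfold normalize3
    rw [show (fun (s : Int × Int × Int × Int) key =>
        let value := pvVal v key
        if value > s.2.1 then (key, value, s.1, s.2.1)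
        else if value > s.2.2.2 then (s.1, s.2.1, key, value)
        else s) = pvStep f from rfl]
    rw [pvTop2 f ks, ← hss]
    exact pvItemsA ks _ _ hndk
  have hsub0 : ∀ r ∈ PySem.List.sorted (ks.filter p) (fun k => f k) true, r ∈ ks := by
    intro r hr
    exact List.mem_of_mem_filter ((PySem.List.mem_sorted _ _ _ _).mp hr)
  have hrnd : (PySem.List.sorted (ks.filter p) (fun k => f k) true).Nodup :=
    ((PySem.List.sorted_perm (ks.filter p) (fun k => f k) true).nodup_iff).mpr (hndk.filter p)
  have hB : normalize3_alt v = ks.map (fun k => (k, pvLabelB (PySem.List.sorted (ks.filter p) (fun k => f k) true) k)) :=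
    pvItemsB_gen ks (PySem.List.sorted (ks.filter p) (fun k => f k) true) hndk hrnd hsub0
  rw [hranked] at hB
  rw [hA, hB]
  apply List.map_congr_left
  intro k hk
  have hkm : k ∈ ss := ((PySem.List.sorted_perm ks f true).mem_iff).mpr hk
  -- case analysis on the filtered (=ranked) list
  rcases hfil : ss.filter p with _ | ⟨r0, _ | ⟨r1, rt⟩⟩
  · -- no candidate: every key has f < 0; outside D_, -1 is not a key
    have hall : ∀ z ∈ ss, p z = false := by
      intro z hz
      by_contra hc
      have : z ∈ ss.filter p := List.mem_filter.mpr ⟨hz, by revert hc; cases p z <;> simp⟩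
      rw [hfil] at this; simp at this
    have hm1 : pvSel f ss[0]? = -1 := by
      cases h0 : ss[0]? with
      | none => simp [pvSel]
      | some a =>
        have ha : a ∈ ss := List.mem_of_getElem? h0
        have := hall a ha
        simp only [hp, decide_eq_false_iff_not, not_le] at this
        simp only [pvSel]
        omega
    have hm2 : pvSel f ss[2 - 1]? = -1 := by
      cases h1 : ss[2 - 1]? with
      | none => simp [pvSel]
      | some a =>
        have ha : a ∈ ss := List.mem_of_getElem? h1
        have := hall a ha
        simp only [hp, decide_eq_false_iff_not, not_le] at this
        simp only [pvSel]
        omega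
    have hkne : k ≠ -1 := by
      intro hkeq
      apply hnd'
      have hmem : (-1 : Int) ∈ ks := by rwa [hkeq] at hk
      have hnil : ks.filter p = [] := by
        rw [List.filter_eq_nil_iff]
        intro z hz
        have := hall z (((PySem.List.sorted_perm ks f true).mem_iff).mpr hz)
        simp [this]
      exact ⟨hmem, by simp [hnil], by simp [hnil]⟩
    rw [hm1, hm2]
    simp [pvLabelA, pvLabelB, Ne.symm hkne]
  · -- exactly one candidate r0
    obtain ⟨t, hsseq, htfil⟩ := pvRanked_head f p ss hpw hmono r0 [] hfil
    have hpr0 : p r0 = true := by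
      have : r0 ∈ ss.filter p := by rw [hfil]; simp
      exact List.of_mem_filter this
    have hfr0 : 0 ≤ f r0 := by simpa [hp] using hpr0
    have hm1 : pvSel f ss[0]? = r0 := by
      rw [hsseq]
      simp only [List.getElem?_cons_zero, pvSel]
      rw [if_pos (by omega)]
    have htall : ∀ z ∈ t, p z = false := by
      intro z hz
      by_contra hc
      have : z ∈ t.filter p := List.mem_filter.mpr ⟨hz, by revert hc; cases p z <;> simp⟩
      rw [htfil] at this; simp at this
    have hm2 : pvSel f ss[2 - 1]? = -1 := by
      rw [hsseq]
      cases ht : t with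
      | nil => simp [pvSel]
      | cons b tb =>
        have hb : b ∈ t := by rw [ht]; simp
        have := htall b hb
        simp only [hp, decide_eq_false_iff_not, not_le] at this
        simp only [ht, List.getElem?_cons_succ, List.getElem?_cons_zero, pvSel]
        rw [if_neg (by omega)]
    rw [hm1, hm2]
    by_cases hk0 : k = r0
    · simp [pvLabelA, pvLabelB, hk0]
    · -- outside D_, -1 ∉ ks unless r0 = -1
      have hkne : (-1 : Int) = k → False := by
        intro hkeq
        apply hnd'
        have hmem : (-1 : Int) ∈ ks := by rwa [← hkeq] at hk
        have hcands : ks.filter p = [r0] := by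
          have hperm : (ks.filter p).Perm (ss.filter p) :=
            (List.Perm.filter p (PySem.List.sorted_perm ks f true).symm)
          rw [hfil] at hperm
          exact List.Perm.eq_singleton hperm
        have hr0ne : r0 ≠ -1 := fun h => hk0 (by omega)
        exact ⟨hmem, by simp [hcands], by simp [hcands]; exact fun h => hr0ne h⟩
      simp only [pvLabelA, pvLabelB]
      rw [if_neg (by simp; omega), if_neg (by simpa using fun h => hkne h),
        if_neg (by simpa using hk0)]
  · -- at least two candidates r0, r1
    obtain ⟨t, hsseq, htfil⟩ := pvRanked_head f p ss hpw hmono r0 (r1 :: rt) hfil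
    have hpwt : t.Pairwise (fun a b => f b ≤ f a) := by
      rw [hsseq] at hpw; exact (List.pairwise_cons.mp hpw).2
    obtain ⟨t2, hteq, _⟩ := pvRanked_head f p t hpwt hmono r1 rt htfil
    have hpr0 : p r0 = true := by
      have : r0 ∈ ss.filter p := by rw [hfil]; simp
      exact List.of_mem_filter this
    have hpr1 : p r1 = true := by
      have : r1 ∈ ss.filter p := by rw [hfil]; simp
      exact List.of_mem_filter this
    have hfr0 : 0 ≤ f r0 := by simpa [hp] using hpr0
    have hfr1 : 0 ≤ f r1 := by simpa [hp] using hpr1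
    have hm1 : pvSel f ss[0]? = r0 := by
      rw [hsseq]
      simp only [List.getElem?_cons_zero, pvSel]
      rw [if_pos (by omega)]
    have hm2 : pvSel f ss[2 - 1]? = r1 := by
      rw [hsseq, hteq]
      simp only [List.getElem?_cons_succ, List.getElem?_cons_zero, pvSel]
      rw [if_pos (by omega)]
    have hne : r0 ≠ r1 := by
      rw [hsseq, hteq] at hssnd
      intro h
      exact (List.nodup_cons.mp hssnd).1 (h ▸ (by simp : r1 ∈ r1 :: t2))
    rw [hm1, hm2]
    by_cases hk0 : k = r0
    · simp [pvLabelA, pvLabelB, hk0, hne, Ne.symm hne]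
    · by_cases hk1 : k = r1
      · simp [pvLabelA, pvLabelB, hk1, Ne.symm hk0, hne]
      · simp [pvLabelA, pvLabelB, hk0, hk1, Ne.symm hk0, Ne.symm hk1]

-- inside D_, the two results genuinely differ (at key -1)
theorem pvExact (v : List (Int × List Int)) (hD : D_normalize3 v) :
    normalize3 v ≠ normalize3_alt v := by
  have hndk : (PySem.Dict.ofList v).keys.Nodup := PySem.Dict.nodup_keys_ofList v
  set f := pvVal v with hf
  set ks := (PySem.Dict.ofList v).keys with hks
  set p : Int → Bool := fun k => decide (0 ≤ f k) with hp
  set ss := PySem.List.sorted ks f true with hss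
  have hpw : ss.Pairwise (fun a b => f b ≤ f a) := PySem.List.sorted_pairwise_rev ks f
  have hmono : ∀ a b : Int, f b ≤ f a → p b = true → p a = true := by
    intro a b hab hb
    simp only [hp, decide_eq_true_eq] at hb ⊢
    omega
  have hranked : PySem.List.sorted (ks.filter p) (fun k => f k) true = ss.filter p :=
    (pvSorted_filter f p ks).symm
  obtain ⟨hmem, hlen, hne1⟩ : (-1 : Int) ∈ ks ∧ (ks.filter p).length ≤ 1 ∧ ks.filter p ≠ [-1] := hD
  have hA : normalize3 v = ks.map (fun k => (k, pvLabelA (pvSel f ss[0]?) (pvSel f ss[2 - 1]?) k)) := by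
    unfold normalize3
    rw [show (fun (s : Int × Int × Int × Int) key =>
        let value := pvVal v key
        if value > s.2.1 then (key, value, s.1, s.2.1)
        else if value > s.2.2.2 then (s.1, s.2.1, key, value)
        else s) = pvStep f from rfl]
    rw [pvTop2 f ks, ← hss]
    exact pvItemsA ks _ _ hndk
  have hsub0 : ∀ r ∈ PySem.List.sorted (ks.filter p) (fun k => f k) true, r ∈ ks := by
    intro r hr
    exact List.mem_of_mem_filter ((PySem.List.mem_sorted _ _ _ _).mp hr)
  have hrnd : (PySem.List.sorted (ks.filter p) (fun k => f k) true).Nodup :=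
    ((PySem.List.sorted_perm (ks.filter p) (fun k => f k) true).nodup_iff).mpr (hndk.filter p)
  have hB : normalize3_alt v = ks.map (fun k => (k, pvLabelB (PySem.List.sorted (ks.filter p) (fun k => f k) true) k)) :=
    pvItemsB_gen ks (PySem.List.sorted (ks.filter p) (fun k => f k) true) hndk hrnd hsub0
  rw [hranked] at hB
  rw [hA, hB]
  intro hEq
  have hlab := (List.map_inj_left).mp hEq (-1) hmem
  have hperm : (ks.filter p).Perm (ss.filter p) :=
    List.Perm.filter p (PySem.List.sorted_perm ks f true).symm
  rcases hfil : ss.filter p with _ | ⟨r0, _ | ⟨r1, rt⟩⟩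
  · have hall : ∀ z ∈ ss, p z = false := by
      intro z hz
      by_contra hc
      have : z ∈ ss.filter p := List.mem_filter.mpr ⟨hz, by revert hc; cases p z <;> simp⟩
      rw [hfil] at this; simp at this
    have hm1 : pvSel f ss[0]? = -1 := by
      cases h0 : ss[0]? with
      | none => simp [pvSel]
      | some a =>
        have := hall a (List.mem_of_getElem? h0)
        simp only [hp, decide_eq_false_iff_not, not_le] at this
        simp only [pvSel]
        omega
    rw [hm1, hfil] at hlab
    simp [pvLabelA, pvLabelB] at hlab
  · obtain ⟨t, hsseq, htfil⟩ := pvRanked_head f p ss hpw hmono r0 [] hfil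
    have hpr0 : p r0 = true := by
      have : r0 ∈ ss.filter p := by rw [hfil]; simp
      exact List.of_mem_filter this
    have hfr0 : 0 ≤ f r0 := by simpa [hp] using hpr0
    have hm1 : pvSel f ss[0]? = r0 := by
      rw [hsseq]
      simp only [List.getElem?_cons_zero, pvSel]
      rw [if_pos (by omega)]
    have htall : ∀ z ∈ t, p z = false := by
      intro z hz
      by_contra hc
      have : z ∈ t.filter p := List.mem_filter.mpr ⟨hz, by revert hc; cases p z <;> simp⟩
      rw [htfil] at this; simp at this
    have hm2 : pvSel f ss[2 - 1]? = -1 := by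
      rw [hsseq]
      cases ht : t with
      | nil => simp [pvSel]
      | cons b tb =>
        have := htall b (by rw [ht]; simp)
        simp only [hp, decide_eq_false_iff_not, not_le] at this
        simp only [ht, List.getElem?_cons_succ, List.getElem?_cons_zero, pvSel]
        rw [if_neg (by omega)]
    have hr0ne : r0 ≠ -1 := by
      intro h
      apply hne1
      have hsing : (ks.filter p).Perm [r0] := by rw [hfil] at hperm; exact hperm
      rw [h] at hsing
      exact List.Perm.eq_singleton hsing
    rw [hm1, hm2, hfil] at hlab
    simp [pvLabelA, pvLabelB, hr0ne, Ne.symm hr0ne] at hlab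
  · have hlength := hperm.length_eq
    rw [hfil] at hlength
    simp at hlength
    omega

-- ===== VERDICT (by name: the statements are the Claim_ definitions above) =====
theorem normalize3_spec : Claim_unchanged_normalize3 := by
  intro v _ _
  unfold Spec_normalize3
  intro hnd
  exact pvMain v hnd

theorem normalize3_changed : Claim_changed_normalize3 := by
  unfold Claim_changed_normalize3; decide

theorem normalize3_tight : Claim_exact_normalize3 := by
  intro v _ _ hD
  exact pvExact v hD
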